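-- pv_equiv track=rewrite | github.com/m1sterzer0/DaveProgrammingCompetitions | hackercup/python/2018/2_C.py | solvebrute
-- ===== SOURCE A (Python) =====
-- def solvebrute(N,S,E,X,Y) :
--     ans = 0
--     for i in range(4**N) :
--         dir = [ (i >> (2*j)) & 0x3 for j in range(N)]
--         ## 0 is N, 1 is E, 2 is S, 3 is W
--         blocked = False
--         for j in range(N) :
--             for k in range(N) :
--                 if Y[j] < Y[k] < S and X[k] > X[j] and dir[j] == 0 and dir[k] == 3 : blocked = True; break
--                 if Y[j] < Y[k] < E and X[k] < X[j] and dir[j] == 0 and dir[k] == 1 : blocked = True; break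
--                 if Y[j] > Y[k] > S and X[k] > X[j] and dir[j] == 2 and dir[k] == 3 : blocked = True; break
--                 if Y[j] > Y[k] > E and X[k] < X[j] and dir[j] == 2 and dir[k] == 1 : blocked = True; break
--             if blocked : break
--         if blocked : ans += 1
--     return ans
-- ===== SOURCE B (Python) =====
-- def solvebrute(N,S,E,X,Y) :
--     ## Count assignments WITH a blocked pair as 4**N minus the number of
--     ## conflict-free assignments, found by depth-first backtracking.
--     def conflict(j, k, dj, dk) :
--         return ((Y[j] < Y[k] < S and X[k] > X[j] and dj == 0 and dk == 3) or
--                 (Y[j] < Y[k] < E and X[k] < X[j] and dj == 0 and dk == 1) or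
--                 (Y[j] > Y[k] > S and X[k] > X[j] and dj == 2 and dk == 3) or
--                 (Y[j] > Y[k] > E and X[k] < X[j] and dj == 2 and dk == 1))
--     def free(dirs) :
--         k = len(dirs)
--         if k == N : return 1
--         tot = 0
--         for d in range(4) :
--             if all(not conflict(m, k, dirs[m], d) and not conflict(k, m, d, dirs[m]) for m in range(k)) :
--                 tot += free(dirs + [d])
--         return tot
--     return 4**N - free([])
-- ===== Notes on version B (the rewrite author's own statement) =====
-- stated objective: alternative
-- what changed: Instead of enumerating all 4**N bitmask assignments and scanning every pair of balls in each, B counts the conflict-free assignments by depth-first backtracking that prunes a direction as soon as it conflicts with an already-assigned ball, and returns 4**N minus that count.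
-- outside the precondition, e.g. on solvebrute(1, 0, 0, [], [5]): A returns 0, B returns 0
import Mathlib
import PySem

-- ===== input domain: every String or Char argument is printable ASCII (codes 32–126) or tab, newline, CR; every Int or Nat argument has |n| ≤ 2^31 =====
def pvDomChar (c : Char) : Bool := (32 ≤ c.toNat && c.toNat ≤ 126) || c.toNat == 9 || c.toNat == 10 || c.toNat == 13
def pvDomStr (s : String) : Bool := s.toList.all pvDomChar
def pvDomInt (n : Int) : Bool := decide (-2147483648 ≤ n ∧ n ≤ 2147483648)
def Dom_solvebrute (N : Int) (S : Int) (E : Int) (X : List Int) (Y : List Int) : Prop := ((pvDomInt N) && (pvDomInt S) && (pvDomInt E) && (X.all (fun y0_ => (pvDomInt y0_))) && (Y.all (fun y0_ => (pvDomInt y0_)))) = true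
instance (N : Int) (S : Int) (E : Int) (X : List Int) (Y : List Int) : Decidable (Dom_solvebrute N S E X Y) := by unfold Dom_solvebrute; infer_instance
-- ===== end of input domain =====

-- B changes the algorithm: instead of enumerating all 4^N bitmask assignments and testing each
-- for a blocked pair, it counts the conflict-free assignments by depth-first backtracking
-- (pruning a direction as soon as it conflicts with an already-assigned ball) and returns
-- 4^N minus that count (objective: alternative).

-- ===== PORT A =====
-- L[j] for a nonnegative in-range index (Pre_ guarantees all indices used are in range)
def pvGidx (L : List Int) (j : Nat) : Int := PySem.List.pyGetD L (j : Int) 0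

-- dir = [ (i >> (2*j)) & 0x3 for j in range(N) ]  (i, j ≥ 0, so Nat shift/mask is exact)
def pvDirList (n i : Nat) : List Int := (List.range n).map (fun j => (((i >>> (2*j)) &&& 3 : Nat) : Int))

-- the inner k-loop: four if-statements, each 'blocked = True; break'
def pvLoopK (S E : Int) (X Y : List Int) (dir : List Int) (j : Nat) : List Nat → Bool
  | [] => false
  | k :: ks =>
    if pvGidx Y j < pvGidx Y k ∧ pvGidx Y k < S ∧ pvGidx X k > pvGidx X j ∧ pvGidx dir j = 0 ∧ pvGidx dir k = 3 then true
    else if pvGidx Y j < pvGidx Y k ∧ pvGidx Y k < E ∧ pvGidx X k < pvGidx X j ∧ pvGidx dir j = 0 ∧ pvGidx dir k = 1 then true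
    else if pvGidx Y j > pvGidx Y k ∧ pvGidx Y k > S ∧ pvGidx X k > pvGidx X j ∧ pvGidx dir j = 2 ∧ pvGidx dir k = 3 then true
    else if pvGidx Y j > pvGidx Y k ∧ pvGidx Y k > E ∧ pvGidx X k < pvGidx X j ∧ pvGidx dir j = 2 ∧ pvGidx dir k = 1 then true
    else pvLoopK S E X Y dir j ks

-- the outer j-loop: 'if blocked : break'
def pvLoopJ (S E : Int) (X Y : List Int) (dir : List Int) (n : Nat) : List Nat → Bool
  | [] => false
  | j :: js => if pvLoopK S E X Y dir j (List.range n) then true else pvLoopJ S E X Y dir n js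

-- range(4**N) and range(N): exact for N ≥ 0 (Pre_)
def solvebrute (N : Int) (S : Int) (E : Int) (X : List Int) (Y : List Int) : Int :=
  (List.range (4 ^ N.toNat)).foldl
    (fun ans i =>
      if pvLoopJ S E X Y (pvDirList N.toNat i) N.toNat (List.range N.toNat) then ans + 1 else ans) 0

-- ===== PORT B =====
-- conflict(j, k, dj, dk) of Source B
def pvConflict (S E : Int) (X Y : List Int) (j k : Nat) (dj dk : Int) : Bool :=
  decide (pvGidx Y j < pvGidx Y k ∧ pvGidx Y k < S ∧ pvGidx X k > pvGidx X j ∧ dj = 0 ∧ dk = 3) ||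
  decide (pvGidx Y j < pvGidx Y k ∧ pvGidx Y k < E ∧ pvGidx X k < pvGidx X j ∧ dj = 0 ∧ dk = 1) ||
  decide (pvGidx Y j > pvGidx Y k ∧ pvGidx Y k > S ∧ pvGidx X k > pvGidx X j ∧ dj = 2 ∧ dk = 3) ||
  decide (pvGidx Y j > pvGidx Y k ∧ pvGidx Y k > E ∧ pvGidx X k < pvGidx X j ∧ dj = 2 ∧ dk = 1)

-- the 'all(...)' prune test for assigning direction d to ball k = len(dirs)
def pvOkStep (S E : Int) (X Y : List Int) (dirs : List Int) (d : Int) : Bool :=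
  (List.range dirs.length).all (fun m =>
    !pvConflict S E X Y m dirs.length (pvGidx dirs m) d &&
    !pvConflict S E X Y dirs.length m d (pvGidx dirs m))

-- free(dirs) of Source B; the Nat argument is the remaining depth N - len(dirs)
def pvCountFree (S E : Int) (X Y : List Int) : Nat → List Int → Int
  | 0, _ => 1
  | g+1, dirs =>
    ([0, 1, 2, 3] : List Int).foldl
      (fun tot d => if pvOkStep S E X Y dirs d then tot + pvCountFree S E X Y g (dirs ++ [d]) else tot) 0

-- 4**N exact for N ≥ 0 (Pre_)
def solvebrute_alt (N : Int) (S : Int) (E : Int) (X : List Int) (Y : List Int) : Int :=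
  (4 : Int) ^ N.toNat - pvCountFree S E X Y N.toNat []

-- ===== PRECONDITION & SPEC =====
-- Pre_ excludes N < 0 (range(4**N) raises TypeError) and lists shorter than N, on which A's
-- indexing Y[j]/X[k] raises IndexError; on a few short-X inputs whose Y-geometry never reaches
-- an X access A happens to return, and those accidental survivors are excluded with the rest.
def Pre_solvebrute (N : Int) (S : Int) (E : Int) (X : List Int) (Y : List Int) : Prop :=
  0 ≤ N ∧ N ≤ X.length ∧ N ≤ Y.length
instance (N : Int) (S : Int) (E : Int) (X : List Int) (Y : List Int) : Decidable (Pre_solvebrute N S E X Y) := by unfold Pre_solvebrute; infer_instance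

def pvWitness_solvebrute : Int × Int × Int × List Int × List Int := (2, 1, -1, [0, 2], [0, 1])

def Spec_solvebrute (N : Int) (S : Int) (E : Int) (X : List Int) (Y : List Int) (out : Int) : Prop := out = solvebrute_alt N S E X Y
instance (N : Int) (S : Int) (E : Int) (X : List Int) (Y : List Int) (out : Int) : Decidable (Spec_solvebrute N S E X Y out) := by unfold Spec_solvebrute; infer_instance

-- ===== CLAIM (what is proved, stated in full; the proofs are below) =====
def Claim_equal_solvebrute : Prop := ∀ (N : Int) (S : Int) (E : Int) (X : List Int) (Y : List Int), Dom_solvebrute N S E X Y → Pre_solvebrute N S E X Y → Spec_solvebrute N S E X Y (solvebrute N S E X Y)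

-- ===== LEMMAS AND PROOFS =====

-- 'dirs ++ suffix has some conflicting pair (j,k) with max(j,k) ≥ t', as a decidable proposition
def pvHasNew (S E : Int) (X Y : List Int) (t : Nat) (L : List Int) : Bool :=
  decide (∃ j, j < L.length ∧ ∃ k, k < L.length ∧ (t ≤ j ∨ t ≤ k) ∧
    pvConflict S E X Y j k (pvGidx L j) (pvGidx L k) = true)

-- 'the whole suffix s can be appended to dirs without creating a new conflict'
def pvExtFree (S E : Int) (X Y : List Int) : List Int → List Int → Bool
  | _, [] => true
  | dirs, d :: rest => pvOkStep S E X Y dirs d && pvExtFree S E X Y (dirs ++ [d]) rest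

theorem pvGidx_eq (L : List Int) (j : Nat) : pvGidx L j = L.getD j 0 := by
  simp [pvGidx]

theorem pvConflict_self (S E : Int) (X Y : List Int) (j : Nat) (v : Int) :
    pvConflict S E X Y j j v v = false := by
  simp [pvConflict]

theorem pvLoopK_eq (S E : Int) (X Y : List Int) (dir : List Int) (j : Nat) (ks : List Nat) :
    pvLoopK S E X Y dir j ks =
      ks.any (fun k => pvConflict S E X Y j k (pvGidx dir j) (pvGidx dir k)) := by
  induction ks with
  | nil => simp [pvLoopK]
  | cons k ks ih =>
    rw [pvLoopK, List.any_cons, ← ih, pvConflict]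
    split_ifs <;> simp_all

theorem pvLoopJ_eq (S E : Int) (X Y : List Int) (dir : List Int) (n : Nat) (js : List Nat) :
    pvLoopJ S E X Y dir n js = js.any (fun j => pvLoopK S E X Y dir j (List.range n)) := by
  induction js with
  | nil => simp [pvLoopJ]
  | cons j js ih =>
    rw [pvLoopJ, List.any_cons, ← ih]
    split_ifs with h <;> simp [h]

theorem pvBlocked_eq (S E : Int) (X Y : List Int) (dir : List Int) (n : Nat) (hlen : dir.length = n) :
    pvLoopJ S E X Y dir n (List.range n) = pvHasNew S E X Y 0 dir := by
  rw [Bool.eq_iff_iff, pvLoopJ_eq]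
  simp only [List.any_eq_true, pvLoopK_eq, List.mem_range, pvHasNew, decide_eq_true_eq, hlen]
  constructor
  · rintro ⟨j, hj, k, hk, hC⟩
    exact ⟨j, hj, k, hk, Or.inl (Nat.zero_le _), hC⟩
  · rintro ⟨j, hj, k, hk, -, hC⟩
    exact ⟨j, hj, k, hk, hC⟩

theorem pvOkStep_iff (S E : Int) (X Y : List Int) (dirs : List Int) (d : Int) :
    pvOkStep S E X Y dirs d = true ↔
      ∀ m, m < dirs.length →
        pvConflict S E X Y m dirs.length (pvGidx dirs m) d = false ∧
        pvConflict S E X Y dirs.length m d (pvGidx dirs m) = false := by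
  simp only [pvOkStep, List.all_eq_true, List.mem_range, Bool.and_eq_true, Bool.not_eq_true']

theorem pvExtFree_eq (S E : Int) (X Y : List Int) :
    ∀ (s dirs : List Int), pvExtFree S E X Y dirs s = !pvHasNew S E X Y dirs.length (dirs ++ s) := by
  intro s
  induction s with
  | nil =>
    intro dirs
    rw [pvExtFree, List.append_nil, Bool.eq_iff_iff]
    simp only [pvHasNew, Bool.not_eq_true', decide_eq_false_iff_not, true_iff]
    rintro ⟨j, hj, k, hk, hmax, -⟩; omega
  | cons d rest ih =>
    intro dirs
    rw [pvExtFree, ih, Bool.eq_iff_iff]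
    have hL : dirs ++ [d] ++ rest = dirs ++ d :: rest := by simp
    rw [hL]
    set t := dirs.length with ht
    set L := dirs ++ d :: rest with hLdef
    have hlen : L.length = t + 1 + rest.length := by
      simp only [hLdef, ht, List.length_append, List.length_cons]; omega
    have hv1 : ∀ m, m < t → pvGidx L m = pvGidx dirs m := by
      intro m hm
      rw [pvGidx_eq, pvGidx_eq, hLdef, List.getD_append _ _ _ _ (by omega)]
    have hv2 : pvGidx L t = d := by
      rw [pvGidx_eq, hLdef, ht]
      rw [List.getD_eq_getElem?_getD, List.getElem?_append_right (by omega)]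
      simp
    have hlen1 : (dirs ++ [d]).length = t + 1 := by simp [ht]
    rw [hlen1]
    simp only [pvHasNew, Bool.and_eq_true, Bool.not_eq_true', decide_eq_false_iff_not,
      decide_eq_true_eq]
    constructor
    · rintro ⟨hok, hnew⟩ ⟨j, hj, k, hk, hmax, hC⟩
      by_cases hbig : t + 1 ≤ j ∨ t + 1 ≤ k
      · exact hnew ⟨j, hj, k, hk, hbig, hC⟩
      · push_neg at hbig
        rcases hmax with hmj | hmk
        · have hj' : j = t := by omega
          subst hj'
          by_cases hkt : k = t
          · subst hkt; rw [hv2] at hC; rw [pvConflict_self] at hC; exact absurd hC (by simp)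
          · have hk' : k < t := by omega
            have := (pvOkStep_iff S E X Y dirs d).mp hok k hk'
            rw [hv2, hv1 k hk'] at hC
            rw [← ht] at this
            exact absurd hC (by simp [this.2])
        · have hk' : k = t := by omega
          subst hk'
          by_cases hjt : j = t
          · subst hjt; rw [hv2] at hC; rw [pvConflict_self] at hC; exact absurd hC (by simp)
          · have hj' : j < t := by omega
            have := (pvOkStep_iff S E X Y dirs d).mp hok j hj'
            rw [hv2, hv1 j hj'] at hC
            rw [← ht] at this
            exact absurd hC (by simp [this.1])
    · intro hno
      constructor
      · by_contra hok
        rw [Bool.not_eq_true] at hok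
        have : ¬ (pvOkStep S E X Y dirs d = true) := by simp [hok]
        rw [pvOkStep_iff] at this
        push_neg at this
        obtain ⟨m, hm, hbad⟩ := this
        rw [← ht] at hbad hm
        have hmL : m < L.length := by omega
        have htL : t < L.length := by omega
        by_cases h1 : pvConflict S E X Y m t (pvGidx dirs m) d = false
        · have h2 := hbad h1
          apply hno
          refine ⟨t, htL, m, hmL, Or.inl le_rfl, ?_⟩
          rw [hv2, hv1 m hm]
          revert h2; cases pvConflict S E X Y t m d (pvGidx dirs m) <;> simp
        · apply hno
          refine ⟨m, hmL, t, htL, Or.inr le_rfl, ?_⟩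
          rw [hv2, hv1 m hm]
          revert h1; cases pvConflict S E X Y m t (pvGidx dirs m) d <;> simp
      · rintro ⟨j, hj, k, hk, hmax, hC⟩
        exact hno ⟨j, hj, k, hk, by omega, hC⟩

theorem pvFoldlCount (p : Nat → Bool) :
    ∀ (l : List Nat) (a : Int),
      l.foldl (fun ans i => if p i then ans + 1 else ans) a = a + (l.countP p : Int) := by
  intro l
  induction l with
  | nil => intro a; simp
  | cons x l ih =>
    intro a
    rw [List.foldl_cons, ih, List.countP_cons]
    by_cases h : p x <;> simp [h] <;> push_cast <;> ring

theorem pvCountPmul4 (M : Nat) (P : Nat → Bool) :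
    (List.range (4 * M)).countP P =
      (List.range M).countP (fun q => P (4 * q)) + (List.range M).countP (fun q => P (4 * q + 1)) +
      (List.range M).countP (fun q => P (4 * q + 2)) + (List.range M).countP (fun q => P (4 * q + 3)) := by
  induction M with
  | zero => simp
  | succ M ih =>
    have h4 : 4 * (M + 1) = 4 * M + 4 := by ring
    rw [h4, List.range_add, List.countP_append, List.countP_map, ih]
    have hr4 : List.range 4 = [0, 1, 2, 3] := by decide
    rw [hr4]
    simp only [List.range_succ, List.countP_append, List.countP_cons, List.countP_nil,
      Function.comp]
    norm_num
    split_ifs <;> omega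

theorem pvDirList_succ (n i : Nat) :
    pvDirList (n + 1) i = (((i % 4 : Nat) : Int)) :: pvDirList n (i / 4) := by
  have hmask : ∀ x : Nat, x &&& 3 = x % 4 := by
    intro x
    have := Nat.and_two_pow_sub_one_eq_mod x 2
    norm_num at this; omega
  have hdiv : ∀ x : Nat, x >>> 2 = x / 4 := by
    intro x
    have := Nat.shiftRight_eq_div_pow x 2
    norm_num at this; omega
  rw [pvDirList, pvDirList, List.range_succ_eq_map, List.map_cons, List.map_map]
  refine congrArg₂ List.cons ?_ ?_
  · rw [Nat.mul_zero, Nat.shiftRight_zero, hmask]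
  · apply List.map_congr_left
    intro j _
    simp only [Function.comp]
    have h2j : 2 * (j + 1) = 2 + 2 * j := by ring
    rw [h2j, Nat.shiftRight_add, hdiv]

theorem pvCountP_const_and (a : Bool) (p : Nat → Bool) (l : List Nat) :
    l.countP (fun x => a && p x) = if a then l.countP p else 0 := by
  cases a <;> simp

theorem pvCountFree_eq (S E : Int) (X Y : List Int) (g : Nat) :
    ∀ dirs : List Int,
      pvCountFree S E X Y g dirs =
        (((List.range (4 ^ g)).countP (fun i => pvExtFree S E X Y dirs (pvDirList g i)) : Nat) : Int) := by
  induction g with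
  | zero =>
    intro dirs
    simp [pvCountFree, pvExtFree, pvDirList]
  | succ g ih =>
    intro dirs
    have hpow : 4 ^ (g + 1) = 4 * 4 ^ g := by ring
    rw [hpow, pvCountPmul4]
    have hstep : ∀ (r : Nat) (q : Nat), r < 4 →
        pvExtFree S E X Y dirs (pvDirList (g + 1) (4 * q + r)) =
          (pvOkStep S E X Y dirs (r : Int) && pvExtFree S E X Y (dirs ++ [(r : Int)]) (pvDirList g q)) := by
      intro r q hr
      rw [pvDirList_succ]
      have hm : (4 * q + r) % 4 = r := by omega
      have hd : (4 * q + r) / 4 = q := by omega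
      rw [hm, hd, pvExtFree]
    have hterm : ∀ r : Nat, r < 4 →
        (List.range (4 ^ g)).countP (fun q => pvExtFree S E X Y dirs (pvDirList (g + 1) (4 * q + r))) =
          if pvOkStep S E X Y dirs (r : Int) then
            (List.range (4 ^ g)).countP (fun q => pvExtFree S E X Y (dirs ++ [(r : Int)]) (pvDirList g q))
          else 0 := by
      intro r hr
      rw [← pvCountP_const_and]
      apply List.countP_congr
      intro q _
      rw [hstep r q hr]
    have h0 := hterm 0 (by omega)
    have h1 := hterm 1 (by omega)
    have h2 := hterm 2 (by omega)
    have h3 := hterm 3 (by omega)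
    norm_num at h0 h1 h2 h3
    rw [pvCountFree]
    simp only [List.foldl_cons, List.foldl_nil]
    rw [h0, h1, h2, h3]
    push_cast
    split_ifs <;> simp [ih] <;> push_cast <;> ring

theorem pvMain (N S E : Int) (X Y : List Int) :
    solvebrute N S E X Y = solvebrute_alt N S E X Y := by
  rw [solvebrute, solvebrute_alt, pvFoldlCount, pvCountFree_eq]
  set n := N.toNat with hn
  have hpt : ∀ i : Nat,
      pvLoopJ S E X Y (pvDirList n i) n (List.range n) =
        !(pvExtFree S E X Y [] (pvDirList n i)) := by
    intro i
    rw [pvExtFree_eq, List.length_nil, List.nil_append, Bool.not_not]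
    exact pvBlocked_eq S E X Y _ n (by simp [pvDirList])
  have hc : (List.range (4 ^ n)).countP (fun i => pvLoopJ S E X Y (pvDirList n i) n (List.range n)) =
      (List.range (4 ^ n)).countP (fun i => !(pvExtFree S E X Y [] (pvDirList n i))) := by
    apply List.countP_congr
    intro i _
    rw [hpt i]
  rw [hc]
  have hsplit := List.length_eq_countP_add_countP (l := List.range (4 ^ n))
    (p := fun i => pvExtFree S E X Y [] (pvDirList n i))
  rw [List.length_range] at hsplit
  have hnot : (List.range (4 ^ n)).countP (fun i => !(pvExtFree S E X Y [] (pvDirList n i))) =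
      (List.range (4 ^ n)).countP (fun i => decide ¬(pvExtFree S E X Y [] (pvDirList n i) = true)) := by
    apply List.countP_congr
    intro i _
    cases pvExtFree S E X Y [] (pvDirList n i) <;> simp
  rw [hnot]
  have h4 : ((4 : Int) ^ n) = ((4 ^ n : Nat) : Int) := by push_cast; ring
  rw [h4]
  omega

-- ===== VERDICT (by name: the statement is the Claim_ definition above) =====
theorem solvebrute_spec : Claim_equal_solvebrute := by
  intro N S E X Y _ _
  unfold Spec_solvebrute
  exact pvMain N S E X Y
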